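-- pv_equiv track=rewrite | github.com/JudgeZ/parser-lineage-analyzer | parser_lineage_analyzer/_analysis_templates.py | dynamic_template_literals_python
-- ===== SOURCE A (Python) =====
-- def _template_spans(text: str) -> list[tuple[int, int, str]]:
--     spans: list[tuple[int, int, str]] = []
--     start = 0
--     while True:
--         marker = text.find("%{", start)
--         if marker == -1:
--             return spans
--         close = text.find("}", marker + 2)
--         if close == -1:
--             start = marker + 2
--             continue
--         if close > marker + 2:
--             spans.append((marker, close + 1, text[marker + 2 : close]))
--         start = close + 1
--
-- def dynamic_template_literals_python(text: str) -> tuple[str, ...]: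
--     literals: list[str] = []
--     last = 0
--     for start, end, _ref in _template_spans(text):
--         literal = text[last:start]
--         if literal:
--             literals.append(literal)
--         last = end
--     if text[last:]:
--         literals.append(text[last:])
--     return tuple(literals)
-- ===== SOURCE B (Python) =====
-- def dynamic_template_literals_python(text: str) -> tuple[str, ...]:
--     # Single left-to-right scan: cut out firing %{...} markers on the fly,
--     # accumulating literal characters in a buffer (no intermediate span list).
--     parts: list[str] = []
--     buf: list[str] = []
--     i = 0
--     n = len(text)
--     while i < n:
--         if text[i] == "%" and i + 1 < n and text[i + 1] == "{":
--             j = text.find("}", i + 2)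
--             if j > i + 2:
--                 if buf:
--                     parts.append("".join(buf))
--                     buf = []
--                 i = j + 1
--                 continue
--         buf.append(text[i])
--         i += 1
--     if buf:
--         parts.append("".join(buf))
--     return tuple(parts)
-- ===== Notes on version B (the rewrite author's own statement) =====
-- stated objective: alternative
-- what changed: A builds an index of %{...} spans with a find-loop and then cuts the text along it in a second pass; B does a single left-to-right scan that cuts firing markers out on the fly, accumulating literal characters in a buffer and never materialising a span list.
import Mathlib
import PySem

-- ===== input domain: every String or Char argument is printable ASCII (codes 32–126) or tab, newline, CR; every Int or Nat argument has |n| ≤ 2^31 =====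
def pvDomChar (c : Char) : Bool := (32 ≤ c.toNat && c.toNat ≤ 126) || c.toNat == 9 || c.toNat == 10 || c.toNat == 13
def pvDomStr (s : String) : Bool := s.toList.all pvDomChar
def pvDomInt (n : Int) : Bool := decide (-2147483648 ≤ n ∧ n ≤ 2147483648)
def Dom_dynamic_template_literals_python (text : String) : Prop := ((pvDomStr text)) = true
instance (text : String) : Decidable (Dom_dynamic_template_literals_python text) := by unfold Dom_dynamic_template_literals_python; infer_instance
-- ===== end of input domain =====

-- B replaces A's two-pass structure (build a span index with a find-loop, then cut the text
-- along it) by a single left-to-right scan that cuts firing %{...} markers out on the fly;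
-- objective: alternative (same output, no intermediate span list).

-- ===== PORT A =====
-- _template_spans: the while-True find-loop; the fuel (length+1) only makes the recursion
-- total — start strictly grows each turn, so the fuel is never exhausted.
def pvSpansGo (text : String) (fuel : Nat) (start : Int)
    (spans : List (Int × Int × String)) : List (Int × Int × String) :=
  match fuel with
  | 0 => spans
  | fuel + 1 =>
    let marker := PySem.Str.findFrom text "%{" start
    if marker = -1 then spans
    else
      let close := PySem.Str.findFrom text "}" (marker + 2)
      if close = -1 then pvSpansGo text fuel (marker + 2) spans
      else if close > marker + 2 then
        pvSpansGo text fuel (close + 1)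
          (spans ++ [(marker, close + 1, PySem.Str.slice text (some (marker + 2)) (some close))])
      else pvSpansGo text fuel (close + 1) spans

def pvTemplateSpans (text : String) : List (Int × Int × String) :=
  pvSpansGo text (text.toList.length + 1) 0 []

-- the 'for start, end, _ref in spans' loop of A, with the final tail append as base case
def pvCutGo (text : String) (lits : List String) (last : Int) :
    List (Int × Int × String) → List String
  | [] =>
    if PySem.Str.slice text (some last) none = "" then lits
    else lits ++ [PySem.Str.slice text (some last) none]
  | (st, en, _) :: rest =>
    let literal := PySem.Str.slice text (some last) (some st)
    pvCutGo text (if literal = "" then lits else lits ++ [literal]) en rest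

def dynamic_template_literals_python (text : String) : List String :=
  pvCutGo text [] 0 (pvTemplateSpans text)

-- ===== PORT B =====
-- the single while-loop of Source B: buf holds the pending literal, parts the output so far
def pvAltGo (cs : List Char) (buf : List Char) (parts : List String) : List String :=
  match cs with
  | c1 :: c2 :: rest =>
    if c1 = '%' ∧ c2 = '{' then
      match PySem.List.index? rest '}' with
      | some j =>
        if 0 < j then
          pvAltGo (rest.drop (j + 1)) []
            (if buf.isEmpty then parts else parts ++ [String.ofList buf])
        else pvAltGo (c2 :: rest) (buf ++ [c1]) parts
      | none => pvAltGo (c2 :: rest) (buf ++ [c1]) parts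
    else pvAltGo (c2 :: rest) (buf ++ [c1]) parts
  | c :: rest => pvAltGo rest (buf ++ [c]) parts
  | [] => if buf.isEmpty then parts else parts ++ [String.ofList buf]
termination_by cs.length
decreasing_by all_goals (simp [List.length_drop]; try omega)

def dynamic_template_literals_python_alt (text : String) : List String :=
  pvAltGo text.toList [] []

-- ===== PRECONDITION & SPEC =====
def Spec_dynamic_template_literals_python (text : String) (out : List String) : Prop := out = dynamic_template_literals_python_alt text
instance (text : String) (out : List String) : Decidable (Spec_dynamic_template_literals_python text out) := by unfold Spec_dynamic_template_literals_python; infer_instance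

-- ===== CLAIM (what is proved, stated in full; the proofs are below) =====
def Claim_equal_dynamic_template_literals_python : Prop := ∀ (text : String), Dom_dynamic_template_literals_python text → Spec_dynamic_template_literals_python text (dynamic_template_literals_python text)

-- ===== LEMMAS AND PROOFS =====

-- a position q of cs at which B's scanner fires (cuts a marker out)
def pvFires (cs : List Char) (q : Nat) : Prop :=
  ['%', '{'] <+: cs.drop q ∧
    ∃ j, PySem.List.index? (cs.drop (q + 2)) '}' = some j ∧ 0 < j

lemma pvGetOfDrop {cs : List Char} {q : Nat} {c : Char} {t : List Char}
    (h : cs.drop q = c :: t) : cs[q]? = some c := by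
  have h0 : (cs.drop q)[0]? = cs[q + 0]? := List.getElem?_drop ..
  rw [h] at h0
  simpa using h0.symm

lemma pvFires_head {cs : List Char} {q : Nat} (h : pvFires cs q) : cs[q]? = some '%' := by
  obtain ⟨⟨t, ht⟩, _⟩ := h
  exact pvGetOfDrop ht.symm

lemma pvSpansGo_acc (text : String) :
    ∀ (fuel : Nat) (s : Int) (acc : List (Int × Int × String)),
      pvSpansGo text fuel s acc = acc ++ pvSpansGo text fuel s [] := by
  intro fuel
  induction fuel with
  | zero => intro s acc; simp [pvSpansGo]
  | succ n ih =>
    intro s acc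
    rw [pvSpansGo, pvSpansGo]
    simp only []
    split
    · simp
    · split
      · exact ih _ _
      · split
        · rw [ih _ (acc ++ _), ih _ ([] ++ _)]; simp
        · exact ih _ _

-- decomposing the text at a marker occurrence
lemma pvDecompMarker {cs : List Char} {m : Nat} (h : ['%', '{'] <+: cs.drop m) :
    m + 2 ≤ cs.length ∧ cs.drop m = '%' :: '{' :: cs.drop (m + 2) ∧
      cs.drop (m + 1) = '{' :: cs.drop (m + 2) := by
  obtain ⟨t, ht⟩ := h
  have hlen := congrArg List.length ht
  simp [List.length_drop] at hlen
  have hle : m + 2 ≤ cs.length := by omega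
  have ht2 : t = cs.drop (m + 2) := by
    have := congrArg (List.drop 2) ht
    simpa [List.drop_drop] using this
  have hm : cs.drop m = '%' :: '{' :: cs.drop (m + 2) := by rw [← ht, ht2]; rfl
  refine ⟨hle, hm, ?_⟩
  have := congrArg (List.drop 1) hm
  simpa [List.drop_drop] using this

lemma pvDecompClose {cs : List Char} {c : Nat} (h : ['}'] <+: cs.drop c) :
    c + 1 ≤ cs.length ∧ cs.drop c = '}' :: cs.drop (c + 1) := by
  obtain ⟨t, ht⟩ := h
  have hlen := congrArg List.length ht
  simp [List.length_drop] at hlen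
  have hle : c + 1 ≤ cs.length := by omega
  have ht2 : t = cs.drop (c + 1) := by
    have := congrArg (List.drop 1) ht
    simpa [List.drop_drop] using this
  exact ⟨hle, by rw [← ht, ht2]; rfl⟩

-- B's scanner walks a fire-free region by plain char appends
lemma pvScan (cs : List Char) :
    ∀ (d p : Nat) (buf : List Char) (parts : List String),
      p + d ≤ cs.length →
      (∀ q, p ≤ q → q < p + d → ¬ pvFires cs q) →
      pvAltGo (cs.drop p) buf parts
        = pvAltGo (cs.drop (p + d)) (buf ++ (cs.drop p).take d) parts := by
  intro d
  induction d with
  | zero => intro p buf parts _ _; simp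
  | succ d ih =>
    intro p buf parts hlen hnf
    have hp : p < cs.length := by omega
    have hdrop : cs.drop p = cs[p] :: cs.drop (p + 1) := List.drop_eq_getElem_cons hp
    have htake : (cs.drop p).take (d + 1) = cs[p] :: (cs.drop (p + 1)).take d := by
      rw [hdrop, List.take_succ_cons]
    have hstep : pvAltGo (cs.drop p) buf parts
        = pvAltGo (cs.drop (p + 1)) (buf ++ [cs[p]]) parts := by
      rw [hdrop]
      cases h1 : cs.drop (p + 1) with
      | nil => exact pvAltGo.eq_2 buf parts cs[p] [] (by intro _ _ h; cases h)
      | cons c2 rest =>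
        rw [pvAltGo.eq_1]
        by_cases hm : cs[p] = '%' ∧ c2 = '{'
        · rw [if_pos hm]
          have hrest : rest = cs.drop (p + 2) := by
            have h2 : List.drop 1 (List.drop (p + 1) cs) = List.drop (p + 1 + 1) cs :=
              List.drop_drop
            rw [h1] at h2
            simpa using h2
          have hnf0 := hnf p le_rfl (by omega)
          cases hj : PySem.List.index? rest '}' with
          | none => rfl
          | some j =>
            have hj0 : ¬ 0 < j := by
              intro hjpos
              apply hnf0
              refine ⟨?_, j, ?_, hjpos⟩
              · rw [hdrop, h1, hm.1, hm.2]; exact ⟨rest, rfl⟩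
              · rw [← hrest]; exact hj
            simp only [if_neg hj0]
        · rw [if_neg hm]
    rw [hstep, htake]
    have hrec := ih (p + 1) (buf ++ [cs[p]]) parts (by omega)
      (fun q hq1 hq2 => hnf q (by omega) (by omega))
    rw [show p + (d + 1) = p + 1 + d by omega, hrec]
    simp

-- joining adjacent pending-literal segments
lemma pvTakeGlue (cs : List Char) (l p m : Nat) (hlp : l ≤ p) (hpm : p ≤ m) :
    (cs.drop l).take (p - l) ++ (cs.drop p).take (m - p) = (cs.drop l).take (m - l) := by
  have h1 : m - l = (p - l) + (m - p) := by omega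
  rw [h1, List.take_add, List.drop_drop]
  have h2 : l + (p - l) = p := by omega
  rw [h2]

-- extending the pending literal by one character
lemma pvTakeSnoc (cs : List Char) (l m : Nat) (hlm : l ≤ m) (hm : m < cs.length) :
    (cs.drop l).take (m + 1 - l) = (cs.drop l).take (m - l) ++ [cs[m]] := by
  have h1 : m + 1 - l = (m - l) + 1 := by omega
  rw [h1, List.take_add_one]
  have h2 : (cs.drop l)[m - l]? = some cs[m] := by
    rw [List.getElem?_drop]
    have h3 : l + (m - l) = m := by omega
    rw [h3]
    exact List.getElem?_eq_getElem hm
  rw [h2]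
  rfl

-- a prefix occurrence beyond s is an infix of the suffix from s
lemma pvInfixOfPrefix {cs sub : List Char} {s q : Nat} (hsq : s ≤ q)
    (h : sub <+: cs.drop q) : sub <:+: cs.drop s := by
  have hdq : (cs.drop s).drop (q - s) = cs.drop q := by
    rw [List.drop_drop]
    congr 1
    omega
  exact h.isInfix.trans (hdq ▸ List.IsSuffix.isInfix (List.drop_suffix (q - s) (cs.drop s)))

lemma pvSliceFrom (text : String) (l : Nat) :
    PySem.Str.slice text (some (l : Int)) none = String.ofList (text.toList.drop l) := by
  rw [PySem.Str.slice]
  congr 1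
  exact PySem.List.slice_from_natCast text.toList l

lemma pvSliceSeg (text : String) (l m : Nat) :
    PySem.Str.slice text (some (l : Int)) (some (m : Int))
      = String.ofList ((text.toList.drop l).take (m - l)) := by
  rw [PySem.Str.slice]
  congr 1
  exact PySem.List.slice_natCast text.toList l m

-- the main lockstep lemma: A's span loop from s (pending-literal origin l) matches
-- B's scanner sitting at p with buf = cs[l:p), provided nothing fires in [p, s)
lemma pvMain (text : String) :
    ∀ (fuel s l p : Nat) (parts : List String),
      l ≤ p → p ≤ s → s ≤ text.toList.length →
      text.toList.length + 1 ≤ fuel + s →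
      (∀ q, p ≤ q → q < s → ¬ pvFires text.toList q) →
      pvCutGo text parts (l : Int) (pvSpansGo text fuel (s : Int) [])
        = pvAltGo (text.toList.drop p) ((text.toList.drop l).take (p - l)) parts := by
  intro fuel
  induction fuel with
  | zero =>
    intro s l p parts _ _ hs hfuel _
    omega
  | succ fuel ih =>
    intro s l p parts hlp hps hs hfuel hnf
    have hsub : ("%{" : String).toList = ['%', '{'] := by decide
    have hsubc : ("}" : String).toList = ['}'] := by decide
    rw [pvSpansGo]
    simp only [PySem.Str.findFrom_eq, hsub, hsubc]
    by_cases hmark : PySem.Chars.findFrom text.toList ['%', '{'] (s : Int) none = -1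
    · -- no more markers: everything from l is one final pending literal
      rw [if_pos hmark]
      have hnomark := (PySem.Chars.findFrom_natCast_eq_neg_one_iff text.toList ['%','{'] s hs).mp hmark
      have hnf2 : ∀ q, p ≤ q → q < p + (text.toList.length - p) → ¬ pvFires text.toList q := by
        intro q hq1 hq2 hf
        by_cases hqs : q < s
        · exact hnf q hq1 hqs hf
        · exact hnomark (pvInfixOfPrefix (by omega) hf.1)
      rw [pvScan text.toList (text.toList.length - p) p _ parts (by omega) hnf2]
      rw [pvTakeGlue text.toList l p text.toList.length hlp (by omega)]
      rw [show p + (text.toList.length - p) = text.toList.length by omega]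
      rw [List.drop_length, pvAltGo.eq_3]
      have htk : (text.toList.drop l).take (text.toList.length - l) = text.toList.drop l := by
        apply List.take_of_length_le
        simp [List.length_drop]
      rw [htk, pvCutGo, pvSliceFrom]
      by_cases hdl : text.toList.drop l = [] <;> simp [hdl]
    · -- a marker was found at mN
      rw [if_neg hmark]
      obtain ⟨hsM, hpre, hmin⟩ :=
        PySem.Chars.findFrom_natCast_spec text.toList ['%','{'] s hs hmark
      set M := PySem.Chars.findFrom text.toList ['%', '{'] (s : Int) none with hMdef
      have h0M : 0 ≤ M := le_trans (by positivity) hsM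
      set mN := M.toNat with hmNdef
      have hM : M = (mN : Int) := (Int.toNat_of_nonneg h0M).symm
      have hsmN : s ≤ mN := by omega
      obtain ⟨hmn2, hdm, hdm1⟩ := pvDecompMarker hpre
      have hgm : text.toList[mN]? = some '%' := pvGetOfDrop hdm
      have hgm1 : text.toList[mN + 1]? = some '{' := pvGetOfDrop hdm1
      rw [hM, show ((mN : Int) + 2) = ((mN + 2 : Nat) : Int) by push_cast; ring]
      -- B side: scan up to the marker, in all subcases
      have hnfA : ∀ q, p ≤ q → q < p + (mN - p) → ¬ pvFires text.toList q := by
        intro q hq1 hq2 hf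
        by_cases hqs : q < s
        · exact hnf q hq1 hqs hf
        · exact hmin q (by omega) (by omega) hf.1
      rw [pvScan text.toList (mN - p) p _ parts (by omega) hnfA,
        show p + (mN - p) = mN by omega,
        pvTakeGlue text.toList l p mN hlp (by omega)]
      by_cases hcl : PySem.Chars.findFrom text.toList ['}'] ((mN + 2 : Nat) : Int) none = -1
      · -- unclosed marker: A moves start to mN+2, B consumes '%' as a literal char
        rw [if_pos hcl]
        have hidx : PySem.List.index? (text.toList.drop (mN + 2)) '}' = none := by
          rw [PySem.List.index?_eq_none_iff]
          intro hmem
          exact ((PySem.Chars.findFrom_natCast_eq_neg_one_iff _ _ (mN + 2) hmn2).mp hcl)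
            ((List.singleton_infix_iff _ _).mpr hmem)
        rw [hdm, pvAltGo.eq_1]
        simp only [hidx]
        have hrec := ih (mN + 2) l (mN + 1) parts (by omega) (by omega) (by omega) (by omega)
          (by
            intro q hq1 hq2 hf
            have hq : q = mN + 1 := by omega
            subst hq
            have := (pvFires_head hf).symm.trans hgm1
            simp at this)
        rw [hrec, ← hdm1, pvTakeSnoc text.toList l mN (by omega) (by omega)]
        have hcm : text.toList[mN] = '%' := by
          have := (List.getElem?_eq_getElem (show mN < text.toList.length by omega)).symm.trans hgm
          exact Option.some.inj this
        rw [hcm]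
        simp
      · -- closed marker
        rw [if_neg hcl]
        obtain ⟨hcge, hcpre, hcmin⟩ :=
          PySem.Chars.findFrom_natCast_spec text.toList ['}'] (mN + 2) hmn2 hcl
        set C := PySem.Chars.findFrom text.toList ['}'] ((mN + 2 : Nat) : Int) none with hCdef
        have h0C : 0 ≤ C := le_trans (by positivity) hcge
        set cN := C.toNat with hcNdef
        have hC : C = (cN : Int) := (Int.toNat_of_nonneg h0C).symm
        have hmc : mN + 2 ≤ cN := by omega
        obtain ⟨hcn1, hdc⟩ := pvDecompClose hcpre
        have hidx : PySem.List.index? (text.toList.drop (mN + 2)) '}' = some (cN - (mN + 2)) := by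
          rw [PySem.List.index?_eq_some_iff]
          refine ⟨(text.toList.drop (mN + 2)).take (cN - (mN + 2)), text.toList.drop (cN + 1),
            ?_, ?_, ?_⟩
          · conv_lhs => rw [← List.take_append_drop (cN - (mN + 2)) (text.toList.drop (mN + 2))]
            congr 1
            rw [List.drop_drop, show mN + 2 + (cN - (mN + 2)) = cN by omega, hdc]
          · rw [List.length_take, List.length_drop]
            omega
          · intro hmem
            obtain ⟨i, hilt, hieq⟩ := List.getElem_of_mem hmem
            have hibnd : i < cN - (mN + 2) := by
              have := hilt
              rw [List.length_take, List.length_drop] at this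
              omega
            have hval : text.toList[mN + 2 + i]'(by omega) = '}' := by
              rw [← hieq, List.getElem_take, List.getElem_drop]
            apply hcmin (mN + 2 + i) (by omega) (by omega)
            refine ⟨text.toList.drop (mN + 2 + i + 1), ?_⟩
            rw [← hval]
            exact (List.drop_eq_getElem_cons (by omega)).symm
        rw [hC]
        by_cases hgt : (cN : Int) > ((mN + 2 : Nat) : Int)
        · -- a real span: A records it, B flushes buf and jumps past the close
          rw [if_pos hgt]
          rw [show ((cN : Int) + 1) = ((cN + 1 : Nat) : Int) by push_cast; ring]
          rw [pvSpansGo_acc text fuel _ ([] ++ [_]), List.nil_append, List.singleton_append, pvCutGo]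
          rw [pvSliceSeg text l mN]
          have hrec := ih (cN + 1) (cN + 1) (cN + 1)
            (if String.ofList ((text.toList.drop l).take (mN - l)) = "" then parts
              else parts ++ [String.ofList ((text.toList.drop l).take (mN - l))])
            le_rfl le_rfl (by omega) (by omega) (by intro q hq1 hq2; omega)
          rw [hrec]
          rw [hdm, pvAltGo.eq_1]
          simp only [hidx, if_pos (show 0 < cN - (mN + 2) by omega)]
          rw [List.drop_drop, show mN + 2 + (cN - (mN + 2) + 1) = cN + 1 by omega]
          simp only [Nat.sub_self, List.take_zero]
          congr 1
          by_cases hb : (text.toList.drop l).take (mN - l) = [] <;> simp [hb]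
        · -- empty %{}: A skips the span, B consumes '%' as a literal char
          rw [if_neg hgt]
          have hceq : cN = mN + 2 := by omega
          rw [show ((cN : Int) + 1) = ((mN + 3 : Nat) : Int) by rw [hceq]; push_cast; ring]
          have hidx0 : PySem.List.index? (text.toList.drop (mN + 2)) '}' = some 0 := by
            rw [hidx, hceq]
            simp
          rw [hdm, pvAltGo.eq_1]
          simp only [hidx0, lt_self_iff_false, if_false]
          have hgm2 : text.toList[mN + 2]? = some '}' := by
            rw [hceq] at hdc
            exact pvGetOfDrop hdc
          have hrec := ih (mN + 3) l (mN + 1) parts (by omega) (by omega) (by omega) (by omega)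
            (by
              intro q hq1 hq2 hf
              have hq : q = mN + 1 ∨ q = mN + 2 := by omega
              cases hq with
              | inl hq =>
                subst hq
                have := (pvFires_head hf).symm.trans hgm1
                simp at this
              | inr hq =>
                subst hq
                have := (pvFires_head hf).symm.trans hgm2
                simp at this)
          rw [hrec, ← hdm1, pvTakeSnoc text.toList l mN (by omega) (by omega)]
          have hcm : text.toList[mN] = '%' := by
            have := (List.getElem?_eq_getElem (show mN < text.toList.length by omega)).symm.trans hgm
            exact Option.some.inj this
          rw [hcm]
          simp

-- ===== VERDICT (by name: the statement is the Claim_ definition above) =====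
theorem dynamic_template_literals_python_spec : Claim_equal_dynamic_template_literals_python := by
  intro text _
  unfold Spec_dynamic_template_literals_python dynamic_template_literals_python
    dynamic_template_literals_python_alt pvTemplateSpans
  have h := pvMain text (text.toList.length + 1) 0 0 0 [] le_rfl le_rfl (by omega) (by omega)
    (by intro q hq1 hq2; omega)
  simpa using h
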